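-- pv_equiv track=rewrite | github.com/michaeloboyle/legal-ai-demo | src/services/knowledge_distillation.py | _basic_readability_improvements
-- ===== SOURCE A (Python) =====
-- def _basic_readability_improvements(sentence: str) -> str:
--     """Apply basic readability improvements"""
--
--     # Split long sentences
--     if len(sentence.split()) > 20:
--         # Try to split at conjunctions
--         for conjunction in [', and ', ', but ', ', or ', '; ']:
--             if conjunction in sentence:
--                 parts = sentence.split(conjunction, 1)
--                 if len(parts) == 2:
--                     return f"{parts[0].strip()}. {parts[1].strip()}"
--
--     # Simple word replacements
--     replacements = {
--         'utilize': 'use',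
--         'commence': 'start',
--         'terminate': 'end',
--         'assistance': 'help',
--         'demonstrate': 'show',
--         'sufficient': 'enough',
--         'additional': 'more'
--     }
--
--     improved = sentence
--     for complex_word, simple_word in replacements.items():
--         improved = improved.replace(complex_word, simple_word)
--
--     return improved
-- ===== SOURCE B (Python) =====
-- _CONJUNCTIONS = [', and ', ', but ', ', or ', '; ']
--
-- _REPLACEMENTS = [
--     ('utilize', 'use'),
--     ('commence', 'start'),
--     ('terminate', 'end'),
--     ('assistance', 'help'),
--     ('demonstrate', 'show'),
--     ('sufficient', 'enough'),
--     ('additional', 'more'),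
-- ]
--
--
-- def _basic_readability_improvements(sentence: str) -> str:
--     """Apply basic readability improvements (single-pass variant)."""
--
--     if len(sentence.split()) > 20:
--         for conjunction in _CONJUNCTIONS:
--             if conjunction in sentence:
--                 i = sentence.find(conjunction)
--                 head = sentence[:i]
--                 tail = sentence[i + len(conjunction):]
--                 return f"{head.strip()}. {tail.strip()}"
--
--     # One left-to-right scan; at each position take the first matching key.
--     out = []
--     i = 0
--     n = len(sentence)
--     while i < n:
--         for complex_word, simple_word in _REPLACEMENTS:
--             if sentence.startswith(complex_word, i):
--                 out.append(simple_word)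
--                 i += len(complex_word)
--                 break
--         else:
--             out.append(sentence[i])
--             i += 1
--     return ''.join(out)
-- ===== Notes on version B (the rewrite author's own statement) =====
-- stated objective: alternative
-- what changed: The seven sequential full-string .replace passes are replaced by one left-to-right scan that substitutes the first matching key at each position, and the conjunction split uses find() plus slicing instead of split(conj, 1).
-- outside the precondition, e.g. on _basic_readability_improvements('sufficienterminate'): A returns 'sufficienend', B returns 'enougherminate'; on _basic_readability_improvements('commenceerminate'): A returns 'starend', B returns 'starterminate'
import Mathlib
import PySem

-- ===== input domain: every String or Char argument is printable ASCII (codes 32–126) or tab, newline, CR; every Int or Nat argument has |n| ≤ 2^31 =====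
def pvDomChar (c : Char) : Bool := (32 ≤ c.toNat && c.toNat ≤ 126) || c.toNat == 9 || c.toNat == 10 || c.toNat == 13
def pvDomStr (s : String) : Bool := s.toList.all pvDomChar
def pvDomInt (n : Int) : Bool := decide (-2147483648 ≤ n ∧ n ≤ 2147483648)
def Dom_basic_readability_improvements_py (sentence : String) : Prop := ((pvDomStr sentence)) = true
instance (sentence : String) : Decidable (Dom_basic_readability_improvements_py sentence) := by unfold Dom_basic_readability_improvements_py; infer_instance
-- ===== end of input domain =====

-- B replaces A's seven sequential full-string replace passes by one left-to-right
-- first-match scan, and the conjunction split by find() plus slicing (alternative, not claimed faster).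

-- shared data (the fixed conjunction list and replacement dict of the Python code)
def pvConjs : List String := [", and ", ", but ", ", or ", "; "]

def pvReplS : List (String × String) :=
  [("utilize", "use"), ("commence", "start"), ("terminate", "end"), ("assistance", "help"),
   ("demonstrate", "show"), ("sufficient", "enough"), ("additional", "more")]

def pvPairs : List (List Char × List Char) := pvReplS.map (fun kv => (kv.1.toList, kv.2.toList))

-- ===== PORT A =====
-- the 'for conjunction in [...]' loop with its early return
def pvALoop : List String → String → Option String
  | [], _ => none
  | c :: rest, s =>
    if PySem.Str.isIn c s then
      match PySem.Str.splitMax? s c 1 with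
      | some parts =>
        if parts.length == 2 then
          some (String.ofList ((PySem.Str.strip (PySem.List.pyGetD parts 0 "")).toList
                 ++ ". ".toList ++ (PySem.Str.strip (PySem.List.pyGetD parts 1 "")).toList))
        else pvALoop rest s
      | none => pvALoop rest s
    else pvALoop rest s

def basic_readability_improvements_py (sentence : String) : String :=
  let hit : Option String :=
    if (PySem.Str.split₀ sentence).length > 20 then pvALoop pvConjs sentence else none
  match hit with
  | some r => r
  | none => pvReplS.foldl (fun acc kv => PySem.Str.replace acc kv.1 kv.2) sentence

-- ===== PORT B =====
-- the while-loop with its inner first-match for/break, as structural recursion on the suffix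
def pvBScan : List Char → List Char
  | [] => []
  | c :: t =>
    match pvPairs.find? (fun kv => kv.1.isPrefixOf (c :: t)) with
    | some kv => kv.2 ++ pvBScan (t.drop (kv.1.length - 1))
    | none => c :: pvBScan t
termination_by s => s.length
decreasing_by
  · simp only [List.length_drop, List.length_cons]; omega
  · simp only [List.length_cons]; omega

-- B's conjunction loop: find() + slicing
def pvBConj : List String → String → Option String
  | [], _ => none
  | c :: rest, s =>
    if PySem.Str.isIn c s then
      some (String.ofList (PySem.Chars.strip (s.toList.take (PySem.Str.find s c).toNat)
             ++ ". ".toList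
             ++ PySem.Chars.strip (s.toList.drop ((PySem.Str.find s c).toNat + c.toList.length))))
    else pvBConj rest s

def basic_readability_improvements_py_alt (sentence : String) : String :=
  if (PySem.Str.split₀ sentence).length > 20 then
    match pvBConj pvConjs sentence with
    | some r => r
    | none => String.ofList (pvBScan sentence.toList)
  else String.ofList (pvBScan sentence.toList)

-- ===== PRECONDITION & SPEC =====
def pvBad : List String :=
  ["sufficienterminate", "commenceerminate", "demonstraterminate", "demonstratterminate",
   "assistancterminate", "terminateemonstrate", "terminateemonstratterminate"]

-- Pre_ excludes (unless the long-sentence conjunction split returns early) sentences containing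
-- one of seven interference substrings, where overlapping matches of the fixed replacement keys
-- make A's sequential pass order and B's leftmost-first scan both defensible corner choices.
def Pre_basic_readability_improvements_py (sentence : String) : Prop :=
  ((PySem.Str.split₀ sentence).length > 20 ∧ ∃ c ∈ pvConjs, PySem.Str.isIn c sentence = true)
  ∨ (∀ b ∈ pvBad, PySem.Str.isIn b sentence = false)

instance (sentence : String) : Decidable (Pre_basic_readability_improvements_py sentence) := by
  unfold Pre_basic_readability_improvements_py; infer_instance

def pvWitness_basic_readability_improvements_py : String :=
  "we utilize sufficient resources to demonstrate additional assistance"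

def Spec_basic_readability_improvements_py (sentence : String) (out : String) : Prop :=
  out = basic_readability_improvements_py_alt sentence
instance (sentence : String) (out : String) :
    Decidable (Spec_basic_readability_improvements_py sentence out) := by
  unfold Spec_basic_readability_improvements_py; infer_instance

-- ===== CLAIM (what is proved, stated in full; the proofs are below) =====
def Claim_equal_basic_readability_improvements_py : Prop :=
  ∀ (sentence : String), Dom_basic_readability_improvements_py sentence →
    Pre_basic_readability_improvements_py sentence →
    Spec_basic_readability_improvements_py sentence (basic_readability_improvements_py sentence)

-- ===== LEMMAS AND PROOFS =====

-- ---- clean structural form of Python's str.replace ----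
def pvRepl (k v : List Char) : List Char → List Char
  | [] => []
  | c :: t =>
    if k.isPrefixOf (c :: t) then v ++ pvRepl k v (t.drop (k.length - 1))
    else c :: pvRepl k v t
termination_by s => s.length
decreasing_by
  · simp only [List.length_drop, List.length_cons]; omega
  · simp only [List.length_cons]; omega

theorem pvPrefix_split {w a b : List Char} (h : w <+: a ++ b) :
    w <+: a ∨ (a <+: w ∧ w.drop a.length <+: b) := by
  by_cases hl : w.length ≤ a.length
  · exact Or.inl ((List.isPrefix_append_of_length hl).mp h)
  · have ha : a <+: w :=
      List.prefix_of_prefix_length_le (l₂ := w) (List.prefix_append a b) h (by omega)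
    refine Or.inr ⟨ha, ?_⟩
    rcases h with ⟨r, hr⟩
    have hw : a ++ w.drop a.length = w := List.prefix_iff_eq_append.mp ha
    have : a ++ (w.drop a.length ++ r) = a ++ b := by
      rw [← List.append_assoc, hw, hr]
    exact ⟨r, by simpa using this⟩

theorem pvRepl_nil (k v : List Char) : pvRepl k v [] = [] := by simp [pvRepl]

theorem pvRepl_cons_pos (k v : List Char) (c : Char) (t : List Char)
    (h : k <+: c :: t) :
    pvRepl k v (c :: t) = v ++ pvRepl k v (t.drop (k.length - 1)) := by
  rw [pvRepl, if_pos (List.isPrefixOf_iff_prefix.mpr h)]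

theorem pvRepl_cons_neg (k v : List Char) (c : Char) (t : List Char)
    (h : ¬ k <+: c :: t) :
    pvRepl k v (c :: t) = c :: pvRepl k v t := by
  rw [pvRepl, if_neg]
  simp only [List.isPrefixOf_iff_prefix]
  exact h

theorem pvRepl_go_eq (k v : List Char) (hk : k ≠ []) :
    ∀ (fuel : ℕ) (l acc : List Char), l.length ≤ fuel →
      PySem.Chars.replace.go k v fuel l acc = acc.reverse ++ pvRepl k v l := by
  intro fuel
  induction fuel with
  | zero =>
    intro l acc h
    have : l = [] := List.length_eq_zero_iff.mp (by omega)
    subst this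
    simp [PySem.Chars.replace.go, pvRepl_nil]
  | succ f ih =>
    intro l acc h
    cases l with
    | nil => simp [PySem.Chars.replace.go, pvRepl_nil]
    | cons c t =>
      simp only [PySem.Chars.replace.go]
      by_cases hp : k.isPrefixOf (c :: t)
      · rw [if_pos hp]
        have hpre : k <+: c :: t := List.isPrefixOf_iff_prefix.mp hp
        obtain ⟨m, hm⟩ : ∃ m, k.length = m + 1 := by
          cases hkl : k.length with
          | zero => exact absurd (List.length_eq_zero_iff.mp hkl) hk
          | succ n => exact ⟨n, rfl⟩
        have hdrop : (c :: t).drop k.length = t.drop (k.length - 1) := by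
          rw [hm]; simp
        rw [hdrop, ih _ _ (by simp only [List.length_drop]
                              simp only [List.length_cons] at h
                              omega)]
        rw [pvRepl_cons_pos k v c t hpre]
        simp
      · rw [if_neg hp]
        rw [ih _ _ (by simp only [List.length_cons] at h; omega)]
        rw [pvRepl_cons_neg k v c t (fun hc => hp (List.isPrefixOf_iff_prefix.mpr hc))]
        simp

theorem pvReplace_eq (k v s : List Char) (hk : k ≠ []) :
    PySem.Chars.replace s k v = pvRepl k v s := by
  rw [PySem.Chars.replace, if_neg (by simpa using hk)]
  simpa using pvRepl_go_eq k v hk s.length s [] le_rfl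

theorem pvRepl_skip (k v : List Char) :
    ∀ (x y : List Char), (∀ i < x.length, ¬ k <+: (x ++ y).drop i) →
      pvRepl k v (x ++ y) = x ++ pvRepl k v y := by
  intro x
  induction x with
  | nil => intro y _; simp
  | cons c x' ih =>
    intro y h
    have h0 : ¬ k <+: c :: (x' ++ y) := by
      have := h 0 (by simp)
      simpa using this
    rw [List.cons_append, pvRepl_cons_neg k v _ _ h0,
        ih y (by intro i hi
                 have := h (i + 1) (by simp; omega)
                 simpa using this)]
    simp

-- ---- greedy decomposition of the input into free chars and key slots ----
def pvKey (m : ℕ) : List Char := (pvPairs.getD m ([], [])).1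
def pvVal (m : ℕ) : List Char := (pvPairs.getD m ([], [])).2

def pvOrig : List (Char ⊕ ℕ) → List Char
  | [] => []
  | .inl c :: D => c :: pvOrig D
  | .inr m :: D => pvKey m ++ pvOrig D

def pvRend (i : ℕ) : List (Char ⊕ ℕ) → List Char
  | [] => []
  | .inl c :: D => c :: pvRend i D
  | .inr m :: D => (if m < i then pvVal m else pvKey m) ++ pvRend i D

def pvDec : List Char → List (Char ⊕ ℕ)
  | [] => []
  | c :: t =>
    match pvPairs.findIdx? (fun kv => kv.1.isPrefixOf (c :: t)) with
    | some m => .inr m :: pvDec (t.drop ((pvPairs.getD m ([], [])).1.length - 1))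
    | none => .inl c :: pvDec t
termination_by s => s.length
decreasing_by
  · simp only [List.length_drop, List.length_cons]; omega
  · simp only [List.length_cons]; omega

inductive pvWF : List (Char ⊕ ℕ) → Prop
  | nil : pvWF []
  | free (c : Char) (D : List (Char ⊕ ℕ)) :
      (∀ m, m < 7 → ¬ pvKey m <+: (c :: pvOrig D)) → pvWF D → pvWF (.inl c :: D)
  | slot (m : ℕ) (D : List (Char ⊕ ℕ)) : m < 7 → pvWF D → pvWF (.inr m :: D)

def pvGood (l : List Char) : Prop := ∀ b ∈ pvBad, ¬ b.toList <:+: l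

theorem pvPairs_fst_ne_nil : ∀ kv ∈ pvPairs, kv.1 ≠ [] := by decide

theorem pvPairs_length : pvPairs.length = 7 := by decide

theorem pvKey_eq_of_lt (m : ℕ) (hm : m < pvPairs.length) : pvKey m = (pvPairs[m]).1 := by
  simp [pvKey, List.getD_eq_getElem?_getD, List.getElem?_eq_getElem hm]

theorem pvVal_eq_of_lt (m : ℕ) (hm : m < pvPairs.length) : pvVal m = (pvPairs[m]).2 := by
  simp [pvVal, List.getD_eq_getElem?_getD, List.getElem?_eq_getElem hm]

theorem pvDec_orig (s : List Char) : pvOrig (pvDec s) = s := by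
  induction s using pvDec.induct with
  | case1 => simp [pvDec, pvOrig]
  | case2 c t m hfind ih =>
    rw [pvDec, hfind]
    obtain ⟨hm, hp, -⟩ := List.findIdx?_eq_some_iff_getElem.mp hfind
    have hkey : pvKey m = (pvPairs[m]).1 := pvKey_eq_of_lt m hm
    have hpre : (pvPairs[m]).1 <+: c :: t := List.isPrefixOf_iff_prefix.mp hp
    have hne : (pvPairs[m]).1 ≠ [] := pvPairs_fst_ne_nil _ (List.getElem_mem hm)
    obtain ⟨n, hn⟩ : ∃ n, (pvPairs[m]).1.length = n + 1 := by
      cases hkl : (pvPairs[m]).1.length with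
      | zero => exact absurd (List.length_eq_zero_iff.mp hkl) hne
      | succ n => exact ⟨n, rfl⟩
    have hgd : (pvPairs.getD m ([], [])).1 = (pvPairs[m]).1 := by
      simp [List.getD_eq_getElem?_getD, List.getElem?_eq_getElem hm]
    rw [pvOrig, ih, hgd, hkey]
    have heq := List.prefix_iff_eq_append.mp hpre
    conv_rhs => rw [← heq]
    congr 1
    rw [hn]
    simp
  | case3 c t hfind ih =>
    rw [pvDec, hfind, pvOrig, ih]

theorem pvDec_WF (s : List Char) : pvWF (pvDec s) := by
  induction s using pvDec.induct with
  | case1 => rw [pvDec]; exact pvWF.nil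
  | case2 c t m hfind ih =>
    rw [pvDec, hfind]
    obtain ⟨hm, -, -⟩ := List.findIdx?_eq_some_iff_getElem.mp hfind
    exact pvWF.slot m _ (by rw [← pvPairs_length]; exact hm) ih
  | case3 c t hfind ih =>
    rw [pvDec, hfind]
    refine pvWF.free c _ ?_ ih
    intro m hm hpre
    have hall := List.findIdx?_eq_none_iff.mp hfind
    have hm' : m < pvPairs.length := by rw [pvPairs_length]; exact hm
    have hmem : pvPairs[m] ∈ pvPairs := List.getElem_mem hm'
    have hfalse := hall _ hmem
    rw [pvKey_eq_of_lt m hm'] at hpre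
    rw [pvDec_orig] at hpre
    rw [List.isPrefixOf_iff_prefix.mpr hpre] at hfalse
    simp at hfalse

theorem pvRend_zero (D : List (Char ⊕ ℕ)) : pvRend 0 D = pvOrig D := by
  induction D with
  | nil => rfl
  | cons tok D ih =>
    cases tok with
    | inl c => rw [pvRend, pvOrig, ih]
    | inr m => rw [pvRend, pvOrig, ih]; simp

theorem pvRend_seven (s : List Char) : pvRend 7 (pvDec s) = pvBScan s := by
  induction s using pvDec.induct with
  | case1 => simp [pvDec, pvRend, pvBScan]
  | case2 c t m hfind ih =>
    rw [pvDec, hfind, pvRend, pvBScan]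
    obtain ⟨hm, hp, hmin⟩ := List.findIdx?_eq_some_iff_getElem.mp hfind
    have hfq : pvPairs.find? (fun kv => kv.1.isPrefixOf (c :: t)) = some pvPairs[m] := by
      refine List.find?_eq_some_iff_getElem.mpr ⟨hp, m, hm, rfl, ?_⟩
      intro j hj
      have hb := hmin j hj
      simp only [Bool.not_eq_true] at hb
      simp [hb]
    rw [hfq]
    have hgd : (pvPairs.getD m ([], [])).1 = (pvPairs[m]).1 := by
      simp [List.getD_eq_getElem?_getD, List.getElem?_eq_getElem hm]
    rw [if_pos (by rw [← pvPairs_length]; exact hm), ih,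
        pvVal_eq_of_lt m hm, hgd]
  | case3 c t hfind ih =>
    rw [pvDec, hfind, pvRend, pvBScan]
    have hall := List.findIdx?_eq_none_iff.mp hfind
    have hnone : pvPairs.find? (fun kv => kv.1.isPrefixOf (c :: t)) = none :=
      List.find?_eq_none.mpr (by intro a ha; simp [hall a ha])
    rw [hnone, ih]

theorem pvReach (i : ℕ) :
    ∀ (D : List (Char ⊕ ℕ)) (w : List Char), pvWF D → w <+: pvRend i D →
      w <+: pvOrig D
      ∨ (∃ x m y, m < i ∧ m < 7 ∧ y ≠ [] ∧ w = x ++ y ∧ y <+: pvVal m ∧ (x ++ pvKey m) <+: pvOrig D)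
      ∨ (∃ m, m < i ∧ m < 7 ∧ pvVal m <:+: w) := by
  intro D
  induction D with
  | nil =>
    intro w _ hw
    rw [pvRend] at hw
    rw [List.prefix_nil.mp hw]
    exact Or.inl (List.nil_prefix)
  | cons tok D ih =>
    intro w hWF hw
    cases tok with
    | inl c =>
      cases hWF with
      | free _ _ hfree hWF' =>
        cases w with
        | nil => exact Or.inl List.nil_prefix
        | cons c' w' =>
          rw [pvRend] at hw
          obtain ⟨rfl, hw'⟩ := List.cons_prefix_cons.mp hw
          rcases ih w' hWF' hw' with hA | ⟨x, m, y, h1, h2, h3, rfl, h5, h6⟩ | ⟨m, h1, h2, h3⟩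
          · exact Or.inl (by rw [pvOrig]; exact List.cons_prefix_cons.mpr ⟨rfl, hA⟩)
          · refine Or.inr (Or.inl ⟨c' :: x, m, y, h1, h2, h3, rfl, h5, ?_⟩)
            rw [pvOrig]
            exact List.cons_prefix_cons.mpr ⟨rfl, h6⟩
          · exact Or.inr (Or.inr ⟨m, h1, h2,
              h3.trans (List.infix_cons (List.infix_refl w'))⟩)
    | inr m0 =>
      cases hWF with
      | slot _ _ hm0 hWF' =>
        rw [pvRend] at hw
        rcases pvPrefix_split hw with hcase | ⟨hpre, hrest⟩
        · by_cases hmi : m0 < i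
          · rw [if_pos hmi] at hcase
            by_cases hne : w = []
            · subst hne; exact Or.inl List.nil_prefix
            · refine Or.inr (Or.inl ⟨[], m0, w, hmi, hm0, hne, (List.nil_append w).symm, hcase, ?_⟩)
              rw [List.nil_append, pvOrig]
              exact List.prefix_append _ _
          · rw [if_neg hmi] at hcase
            exact Or.inl (by rw [pvOrig]; exact hcase.trans (List.prefix_append _ _))
        · by_cases hmi : m0 < i
          · rw [if_pos hmi] at hpre
            exact Or.inr (Or.inr ⟨m0, hmi, hm0, hpre.isInfix⟩)
          · rw [if_neg hmi] at hpre hrest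
            have hweq : pvKey m0 ++ w.drop (pvKey m0).length = w := List.prefix_iff_eq_append.mp hpre
            rcases ih _ hWF' hrest with hA | ⟨x, m, y, h1, h2, h3, heq, h5, h6⟩ | ⟨m, h1, h2, h3⟩
            · refine Or.inl ?_
              rw [pvOrig, ← hweq]
              exact (List.prefix_append_right_inj _).mpr hA
            · refine Or.inr (Or.inl ⟨pvKey m0 ++ x, m, y, h1, h2, h3, ?_, h5, ?_⟩)
              · rw [← hweq, heq, List.append_assoc]
              · rw [pvOrig, List.append_assoc]
                exact (List.prefix_append_right_inj _).mpr h6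
            · exact Or.inr (Or.inr ⟨m, h1, h2, h3.trans (List.drop_suffix _ _).isInfix⟩)

theorem pvGood_mono {l l' : List Char} (h : l <:+: l') (hG : pvGood l') : pvGood l :=
  fun b hb hinf => hG b hb (hinf.trans h)

theorem pvKey_ne_nil : ∀ j < 7, pvKey j ≠ [] := by decide

theorem pvKey_len_le : ∀ j < 7, (pvKey j).length ≤ 11 := by decide

theorem pvValNotInfixKey : ∀ j < 7, ∀ m' < j, ¬ pvVal m' <:+: pvKey j := by decide

-- no key is a prefix of (a proper suffix of) another chunk constant
theorem pvDecP0K : ∀ j < 7, ∀ m < 7, ∀ p < 11, m ≠ j → ¬ pvKey j <+: (pvKey m).drop p := by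
  decide

theorem pvDecP0V : ∀ j < 7, ∀ m < 7, ∀ p < 11, ¬ pvKey j <+: (pvVal m).drop p := by decide

-- an occurrence starting inside a chunk and reaching the original continuation
-- pins down one of the interference substrings of pvBad
theorem pvDecAK : ∀ j ∈ List.range 7, ∀ m ∈ List.range 7, ∀ p ∈ List.range 11,
    j < m → p < (pvKey m).length → (pvKey m).drop p <+: pvKey j →
    ∃ bb ∈ pvBad, bb.toList <:+: (pvKey m ++ (pvKey j).drop ((pvKey m).length - p)) := by decide

theorem pvDecAV : ∀ j ∈ List.range 7, ∀ m ∈ List.range 7, ∀ p ∈ List.range 11,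
    m < j → p < (pvVal m).length → (pvVal m).drop p <+: pvKey j →
    ∃ bb ∈ pvBad, bb.toList <:+: (pvKey m ++ (pvKey j).drop ((pvVal m).length - p)) := by decide

-- … and reaching an already-substituted later slot pins down the cascade substring
theorem pvDecBK : ∀ j ∈ List.range 7, ∀ m ∈ List.range 7, ∀ p ∈ List.range 11, ∀ m' ∈ List.range 7, ∀ q ∈ List.range 11,
    j < m → m' < j → (pvKey m).drop p <+: pvKey j →
    ((pvKey j).drop ((pvKey m).length - p)).drop q ≠ [] →
    ((pvKey j).drop ((pvKey m).length - p)).drop q <+: pvVal m' →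
    ∃ bb ∈ pvBad,
      bb.toList <:+: (pvKey m ++ ((pvKey j).drop ((pvKey m).length - p)).take q ++ pvKey m') := by
  decide

theorem pvDecBV : ∀ j ∈ List.range 7, ∀ m ∈ List.range 7, ∀ p ∈ List.range 11, ∀ m' ∈ List.range 7, ∀ q ∈ List.range 11,
    m < j → m' < j → (pvVal m).drop p <+: pvKey j →
    ((pvKey j).drop ((pvVal m).length - p)).drop q ≠ [] →
    ((pvKey j).drop ((pvVal m).length - p)).drop q <+: pvVal m' →
    ∃ bb ∈ pvBad,
      bb.toList <:+: (pvKey m ++ ((pvKey j).drop ((pvVal m).length - p)).take q ++ pvKey m') := by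
  decide

-- occurrence starting at a free character and reaching an already-substituted slot
theorem pvDecFree : ∀ j ∈ List.range 7, ∀ m ∈ List.range 7, ∀ q ∈ List.range 11,
    m < j →
    ((pvKey j).drop 1).drop q ≠ [] → ((pvKey j).drop 1).drop q <+: pvVal m →
    ∃ bb ∈ pvBad, bb.toList <:+: ((pvKey j).take (1 + q) ++ pvKey m) := by decide

theorem pvVal_len_le : ∀ m < 7, (pvVal m).length ≤ 11 := by decide

theorem pvFreeNoOcc (j : ℕ) (hj : j < 7) (c : Char) (D : List (Char ⊕ ℕ)) (hWF : pvWF D)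
    (hfree : ∀ m, m < 7 → ¬ pvKey m <+: c :: pvOrig D)
    (hG : pvGood (c :: pvOrig D)) :
    ¬ pvKey j <+: c :: pvRend j D := by
  intro h
  obtain ⟨c0, tl, hkey⟩ : ∃ c0 tl, pvKey j = c0 :: tl := by
    cases hk : pvKey j with
    | nil => exact absurd hk (pvKey_ne_nil j hj)
    | cons a b => exact ⟨a, b, rfl⟩
  rw [hkey] at h
  obtain ⟨hc0, htl⟩ := List.cons_prefix_cons.mp h
  have htllen : tl.length ≤ 10 := by
    have := pvKey_len_le j hj
    rw [hkey] at this
    simp at this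
    omega
  rcases pvReach j D tl hWF htl with hA | ⟨x, m, y, h1, h2, h3, heq, h5, h6⟩ | ⟨m, h1, h2, h3⟩
  · exact hfree j hj (by rw [hkey, hc0]; exact List.cons_prefix_cons.mpr ⟨rfl, hA⟩)
  · have hxtake : x = tl.take x.length := by rw [heq, List.take_left]
    have hydrop : y = tl.drop x.length := by rw [heq, List.drop_left]
    have hqlt : x.length < tl.length := by
      have hlen : tl.length = x.length + y.length := by rw [heq]; simp
      have : y.length ≠ 0 := by simpa [List.length_eq_zero_iff] using h3
      omega
    have hdrop1 : (pvKey j).drop 1 = tl := by rw [hkey]; simp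
    obtain ⟨bb, hbb, hbinf⟩ :=
      pvDecFree j (List.mem_range.mpr hj) m (List.mem_range.mpr h2) x.length (List.mem_range.mpr (by omega)) h1
        (by rw [hdrop1, ← hydrop]; exact h3)
        (by rw [hdrop1, ← hydrop]; exact h5)
    refine absurd (hbinf.trans ?_) (hG bb hbb)
    have htake : (pvKey j).take (1 + x.length) = c :: x := by
      rw [hkey, hc0, Nat.add_comm 1 x.length, List.take_succ_cons, ← hxtake]
    rw [htake]
    exact List.IsPrefix.isInfix (by rw [List.cons_append]; exact List.cons_prefix_cons.mpr ⟨rfl, h6⟩)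
  · refine pvValNotInfixKey j hj m h1 (h3.trans ?_)
    rw [hkey]
    exact List.infix_cons (List.infix_refl tl)

theorem pvChunkNoOccV (j m : ℕ) (hj : j < 7) (hm : m < 7) (hmj : m < j)
    (D : List (Char ⊕ ℕ)) (hWF : pvWF D)
    (hG : pvGood (pvKey m ++ pvOrig D)) (p : ℕ) (hp : p < (pvVal m).length) :
    ¬ pvKey j <+: (pvVal m).drop p ++ pvRend j D := by
  intro h
  have hp11 : p < 11 := by
    have := pvVal_len_le m hm
    omega
  rcases pvPrefix_split h with h1 | ⟨h2, h3⟩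
  · exact pvDecP0V j hj m hm p hp11 h1
  · rw [List.length_drop] at h3
    rcases pvReach j D _ hWF h3 with hA | ⟨x, m', y, h1', h2', h3', heq, h5', h6'⟩
      | ⟨m', hm1, hm2, hinf⟩
    · obtain ⟨bb, hbb, hbinf⟩ := pvDecAV j (List.mem_range.mpr hj) m (List.mem_range.mpr hm) p (List.mem_range.mpr hp11) hmj hp h2
      exact absurd
        (hbinf.trans (List.IsPrefix.isInfix ((List.prefix_append_right_inj _).mpr hA)))
        (hG bb hbb)
    · have hxtake : x = ((pvKey j).drop ((pvVal m).length - p)).take x.length := by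
        rw [heq, List.take_left]
      have hydrop : y = ((pvKey j).drop ((pvVal m).length - p)).drop x.length := by
        rw [heq, List.drop_left]
      have hqlt : x.length < ((pvKey j).drop ((pvVal m).length - p)).length := by
        have hlen : ((pvKey j).drop ((pvVal m).length - p)).length = x.length + y.length := by
          rw [heq]; simp
        have : y.length ≠ 0 := by simpa [List.length_eq_zero_iff] using h3'
        omega
      have hw11 : ((pvKey j).drop ((pvVal m).length - p)).length ≤ 11 := by
        have h1 := pvKey_len_le j hj
        have h2 : ((pvKey j).drop ((pvVal m).length - p)).length ≤ (pvKey j).length := by simp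
        omega
      obtain ⟨bb, hbb, hbinf⟩ :=
        pvDecBV j (List.mem_range.mpr hj) m (List.mem_range.mpr hm) p (List.mem_range.mpr hp11) m' (List.mem_range.mpr h2') x.length (List.mem_range.mpr (by omega)) hmj h1' h2
          (by rw [← hydrop]; exact h3') (by rw [← hydrop]; exact h5')
      refine absurd (hbinf.trans ?_) (hG bb hbb)
      rw [← hxtake, List.append_assoc]
      exact List.IsPrefix.isInfix ((List.prefix_append_right_inj _).mpr h6')
    · refine pvValNotInfixKey j hj m' hm1 (hinf.trans ?_)
      exact (List.drop_suffix _ _).isInfix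

theorem pvChunkNoOccK (j m : ℕ) (hj : j < 7) (hm : m < 7) (hmj : j < m)
    (D : List (Char ⊕ ℕ)) (hWF : pvWF D)
    (hG : pvGood (pvKey m ++ pvOrig D)) (p : ℕ) (hp : p < (pvKey m).length) :
    ¬ pvKey j <+: (pvKey m).drop p ++ pvRend j D := by
  intro h
  have hp11 : p < 11 := by
    have := pvKey_len_le m hm
    omega
  rcases pvPrefix_split h with h1 | ⟨h2, h3⟩
  · exact pvDecP0K j hj m hm p hp11 (by omega) h1
  · rw [List.length_drop] at h3
    rcases pvReach j D _ hWF h3 with hA | ⟨x, m', y, h1', h2', h3', heq, h5', h6'⟩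
      | ⟨m', hm1, hm2, hinf⟩
    · obtain ⟨bb, hbb, hbinf⟩ := pvDecAK j (List.mem_range.mpr hj) m (List.mem_range.mpr hm) p (List.mem_range.mpr hp11) hmj hp h2
      exact absurd
        (hbinf.trans (List.IsPrefix.isInfix ((List.prefix_append_right_inj _).mpr hA)))
        (hG bb hbb)
    · have hxtake : x = ((pvKey j).drop ((pvKey m).length - p)).take x.length := by
        rw [heq, List.take_left]
      have hydrop : y = ((pvKey j).drop ((pvKey m).length - p)).drop x.length := by
        rw [heq, List.drop_left]
      have hqlt : x.length < ((pvKey j).drop ((pvKey m).length - p)).length := by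
        have hlen : ((pvKey j).drop ((pvKey m).length - p)).length = x.length + y.length := by
          rw [heq]; simp
        have : y.length ≠ 0 := by simpa [List.length_eq_zero_iff] using h3'
        omega
      have hw11 : ((pvKey j).drop ((pvKey m).length - p)).length ≤ 11 := by
        have h1 := pvKey_len_le j hj
        have h2 : ((pvKey j).drop ((pvKey m).length - p)).length ≤ (pvKey j).length := by simp
        omega
      obtain ⟨bb, hbb, hbinf⟩ :=
        pvDecBK j (List.mem_range.mpr hj) m (List.mem_range.mpr hm) p (List.mem_range.mpr hp11) m' (List.mem_range.mpr h2') x.length (List.mem_range.mpr (by omega)) hmj h1' h2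
          (by rw [← hydrop]; exact h3') (by rw [← hydrop]; exact h5')
      refine absurd (hbinf.trans ?_) (hG bb hbb)
      rw [← hxtake, List.append_assoc]
      exact List.IsPrefix.isInfix ((List.prefix_append_right_inj _).mpr h6')
    · refine pvValNotInfixKey j hj m' hm1 (hinf.trans ?_)
      exact (List.drop_suffix _ _).isInfix

theorem pvRepl_head (k v X : List Char) (hk : k ≠ []) :
    pvRepl k v (k ++ X) = v ++ pvRepl k v X := by
  cases hke : k with
  | nil => exact absurd hke hk
  | cons c tl =>
    rw [List.cons_append, pvRepl_cons_pos _ _ _ _ (by rw [← List.cons_append, ← hke]; exact List.prefix_append _ _)]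
    congr 1
    simp

theorem pvPass (j : ℕ) (hj : j < 7) :
    ∀ (D : List (Char ⊕ ℕ)), pvWF D → pvGood (pvOrig D) →
      pvRepl (pvKey j) (pvVal j) (pvRend j D) = pvRend (j + 1) D := by
  intro D
  induction D with
  | nil => intro _ _; rw [pvRend, pvRend, pvRepl_nil]
  | cons tok D ih =>
    intro hWF hG
    cases tok with
    | inl c =>
      cases hWF with
      | free _ _ hfree hWF' =>
        rw [pvOrig] at hG
        rw [pvRend, pvRend,
            pvRepl_cons_neg _ _ _ _ (pvFreeNoOcc j hj c D hWF' hfree hG),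
            ih hWF' (pvGood_mono (List.infix_cons (List.infix_refl _)) hG)]
    | inr m =>
      cases hWF with
      | slot _ _ hm hWF' =>
        rw [pvOrig] at hG
        have hG' : pvGood (pvOrig D) :=
          pvGood_mono (List.suffix_append _ _).isInfix hG
        by_cases hmj : m = j
        · subst hmj
          rw [pvRend, if_neg (lt_irrefl m), pvRend, if_pos (Nat.lt_succ_self m),
              pvRepl_head _ _ _ (pvKey_ne_nil m hj), ih hWF' hG']
        · by_cases hmlt : m < j
          · rw [pvRend, if_pos hmlt, pvRend, if_pos (by omega),
                pvRepl_skip _ _ _ _ (fun p hplt => by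
                  rw [List.drop_append_of_le_length (by omega)]
                  exact pvChunkNoOccV j m hj hm hmlt D hWF' hG p hplt),
                ih hWF' hG']
          · rw [pvRend, if_neg hmlt, pvRend, if_neg (by omega),
                pvRepl_skip _ _ _ _ (fun p hplt => by
                  rw [List.drop_append_of_le_length (by omega)]
                  exact pvChunkNoOccK j m hj hm (by omega) D hWF' hG p hplt),
                ih hWF' hG']

theorem pvMainChars (s : List Char) (hG : pvGood s) :
    pvPairs.foldl (fun acc kv => pvRepl kv.1 kv.2 acc) s = pvBScan s := by
  have hWF := pvDec_WF s
  have hOrig := pvDec_orig s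
  have h0 : pvRend 0 (pvDec s) = s := by rw [pvRend_zero, hOrig]
  have hG' : pvGood (pvOrig (pvDec s)) := by rw [hOrig]; exact hG
  have e0 := pvPass 0 (by norm_num) _ hWF hG'
  have e1 := pvPass 1 (by norm_num) _ hWF hG'
  have e2 := pvPass 2 (by norm_num) _ hWF hG'
  have e3 := pvPass 3 (by norm_num) _ hWF hG'
  have e4 := pvPass 4 (by norm_num) _ hWF hG'
  have e5 := pvPass 5 (by norm_num) _ hWF hG'
  have e6 := pvPass 6 (by norm_num) _ hWF hG'
  calc pvPairs.foldl (fun acc kv => pvRepl kv.1 kv.2 acc) s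
      = pvRepl (pvKey 6) (pvVal 6) (pvRepl (pvKey 5) (pvVal 5) (pvRepl (pvKey 4) (pvVal 4)
          (pvRepl (pvKey 3) (pvVal 3) (pvRepl (pvKey 2) (pvVal 2) (pvRepl (pvKey 1) (pvVal 1)
          (pvRepl (pvKey 0) (pvVal 0) (pvRend 0 (pvDec s)))))))) := by rw [h0]; rfl
    _ = pvRend 7 (pvDec s) := by
          norm_num at e0 e1 e2 e3 e4 e5 e6
          rw [e0, e1, e2, e3, e4, e5, e6]
    _ = pvBScan s := pvRend_seven s

-- ---- conjunction branch ----
theorem pvGo_m0 (sep : List Char) :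
    ∀ (fuel : ℕ) (acc : List (List Char)) (l' : List Char),
      PySem.Chars.splitOnMax.go sep fuel 0 l' [] acc = (l' :: acc).reverse := by
  intro fuel acc l'
  cases fuel with
  | zero => simp [PySem.Chars.splitOnMax.go]
  | succ f =>
    cases l' with
    | nil => simp [PySem.Chars.splitOnMax.go]
    | cons c rest => simp [PySem.Chars.splitOnMax.go]

theorem pvFindGo_lb (sep : List Char) :
    ∀ (l : List Char) (k : ℕ), PySem.Chars.find.go sep l k = -1 ∨ (k : ℤ) ≤ PySem.Chars.find.go sep l k := by
  intro l
  induction l with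
  | nil =>
    intro k
    by_cases h : sep.isEmpty
    · exact Or.inr (by simp [PySem.Chars.find.go, h])
    · exact Or.inl (by simp [PySem.Chars.find.go, h])
  | cons c t ih =>
    intro k
    by_cases h : sep.isPrefixOf (c :: t)
    · exact Or.inr (by simp [PySem.Chars.find.go, h])
    · rcases ih (k + 1) with h1 | h1
      · exact Or.inl (by simp [PySem.Chars.find.go, h, h1])
      · refine Or.inr ?_
        have : PySem.Chars.find.go sep (c :: t) k = PySem.Chars.find.go sep t (k + 1) := by
          simp [PySem.Chars.find.go, h]
        rw [this]
        omega

theorem pvLockstep (sep : List Char) (hsep : sep ≠ []) :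
    ∀ (l : List Char) (k : ℕ) (cur : List Char) (acc : List (List Char)) (fuel : ℕ),
      l.length < fuel →
      PySem.Chars.splitOnMax.go sep fuel 1 l cur acc =
        if PySem.Chars.find.go sep l k = -1 then ((cur.reverse ++ l) :: acc).reverse
        else acc.reverse ++ [cur.reverse ++ l.take (PySem.Chars.find.go sep l k - k).toNat,
              l.drop ((PySem.Chars.find.go sep l k - k).toNat + sep.length)] := by
  intro l
  induction l with
  | nil =>
    intro k cur acc fuel hf
    have hgo : PySem.Chars.find.go sep [] k = -1 := by
      simp [PySem.Chars.find.go, List.isEmpty_iff, hsep]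
    rw [hgo, if_pos rfl]
    cases fuel with
    | zero => omega
    | succ f => simp [PySem.Chars.splitOnMax.go]
  | cons c t ih =>
    intro k cur acc fuel hf
    cases fuel with
    | zero => simp at hf
    | succ f =>
      by_cases hp : sep.isPrefixOf (c :: t)
      · have hgo : PySem.Chars.find.go sep (c :: t) k = (k : ℤ) := by
          simp [PySem.Chars.find.go, hp]
        rw [hgo]
        rw [if_neg (by omega)]
        have : PySem.Chars.splitOnMax.go sep (f + 1) 1 (c :: t) cur acc
            = PySem.Chars.splitOnMax.go sep f 0 (List.drop sep.length (c :: t)) [] (cur.reverse :: acc) := by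
          simp [PySem.Chars.splitOnMax.go, hp]
        rw [this, pvGo_m0 sep f _ _]
        simp
      · have hgo : PySem.Chars.find.go sep (c :: t) k = PySem.Chars.find.go sep t (k + 1) := by
          simp [PySem.Chars.find.go, hp]
        have hstep : PySem.Chars.splitOnMax.go sep (f + 1) 1 (c :: t) cur acc
            = PySem.Chars.splitOnMax.go sep f 1 t (c :: cur) acc := by
          simp [PySem.Chars.splitOnMax.go, hp]
        rw [hstep, ih (k + 1) (c :: cur) acc f (by simp at hf ⊢; omega), hgo]
        by_cases hres : PySem.Chars.find.go sep t (k + 1) = -1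
        · rw [if_pos hres, if_pos hres]
          simp
        · rw [if_neg hres, if_neg hres]
          have hlb : ((k : ℤ) + 1) ≤ PySem.Chars.find.go sep t (k + 1) := by
            rcases pvFindGo_lb sep t (k + 1) with h1 | h1
            · exact absurd h1 hres
            · exact_mod_cast h1
          have hn : ∃ n : ℕ, PySem.Chars.find.go sep t (k + 1) - k = (n : ℤ) + 1 := by
            refine ⟨(PySem.Chars.find.go sep t (k + 1) - k - 1).toNat, ?_⟩
            omega
          obtain ⟨n, hn⟩ := hn
          have h1 : (PySem.Chars.find.go sep t (k + 1) - (k + 1)).toNat = n := by omega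
          have h2 : (PySem.Chars.find.go sep t (k + 1) - k).toNat = n + 1 := by omega
          simp only [Nat.cast_add, Nat.cast_one]
          rw [h1, h2]
          simp [List.take_succ_cons]
          rw [show n + 1 + sep.length = (n + sep.length) + 1 from by omega, List.drop_succ_cons]

theorem pvSplit1 (sep s : List Char) (hsep : sep ≠ []) (h : PySem.Chars.isIn sep s = true) :
    PySem.Chars.splitOnMax s sep 1 =
      [s.take (PySem.Chars.find s sep).toNat,
       s.drop ((PySem.Chars.find s sep).toNat + sep.length)] := by
  have hfind : PySem.Chars.find s sep ≠ -1 := by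
    rw [PySem.Chars.isIn] at h
    simpa using h
  rw [PySem.Chars.splitOnMax, if_neg (by norm_num)]
  rw [show ((1:ℤ).toNat) = 1 from rfl]
  rw [pvLockstep sep hsep s 0 [] [] (s.length + 1) (by omega)]
  rw [PySem.Chars.find] at hfind
  rw [if_neg hfind]
  simp [PySem.Chars.find]

theorem pvConj_eq (cs : List String) (s : String) (h : ∀ c ∈ cs, c.toList ≠ []) :
    pvALoop cs s = pvBConj cs s := by
  induction cs with
  | nil => rfl
  | cons c rest ih =>
    by_cases hIn : PySem.Str.isIn c s
    · rw [pvALoop, pvBConj, if_pos hIn, if_pos hIn]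
      have hc : c.toList ≠ [] := h c (by simp)
      have hchars : PySem.Chars.isIn c.toList s.toList = true := hIn
      set p0 := String.ofList (s.toList.take (PySem.Chars.find s.toList c.toList).toNat) with hp0
      set p1 := String.ofList
        (s.toList.drop ((PySem.Chars.find s.toList c.toList).toNat + c.toList.length)) with hp1
      have hsm : PySem.Str.splitMax? s c 1 = some [p0, p1] := by
        rw [PySem.Str.splitMax?, PySem.Chars.splitMax?, if_neg (by simpa using hc)]
        rw [pvSplit1 c.toList s.toList hc hchars]
        rfl
      rw [hsm]
      show (if (([p0, p1] : List String).length == 2) = true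
            then some (String.ofList ((PySem.Str.strip (PySem.List.pyGetD [p0, p1] 0 "")).toList
                   ++ ". ".toList ++ (PySem.Str.strip (PySem.List.pyGetD [p0, p1] 1 "")).toList))
            else pvALoop rest s) = _
      have hlen : (([p0, p1] : List String).length == 2) = true := rfl
      rw [hlen]
      simp only [reduceIte]
      have hg0 : PySem.List.pyGetD [p0, p1] (0:ℤ) "" = p0 := PySem.List.pyGetD_zero_cons p0 [p1] ""
      have hg1 : PySem.List.pyGetD [p0, p1] (1:ℤ) "" = p1 := by simp [pysem]
      rw [hg0, hg1, PySem.Str.strip, PySem.Str.strip, hp0, hp1, PySem.Str.find]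
      simp only [String.toList_ofList]
    · rw [pvALoop, pvBConj, if_neg hIn, if_neg hIn]
      exact ih (fun c' hc' => h c' (by simp [hc']))

theorem pvBConj_none (cs : List String) (s : String)
    (hn : pvBConj cs s = none) : ∀ c ∈ cs, PySem.Str.isIn c s = false := by
  induction cs with
  | nil => intro c hc; cases hc
  | cons c rest ih =>
    intro c' hc'
    rw [pvBConj] at hn
    by_cases hIn : PySem.Str.isIn c s
    · rw [if_pos hIn] at hn; cases hn
    · rw [if_neg hIn] at hn
      rcases List.mem_cons.mp hc' with rfl | hmem
      · simpa using hIn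
      · exact ih hn c' hmem

theorem pvFoldBridge :
    ∀ (L : List (String × String)) (s : String), (∀ kv ∈ L, kv.1.toList ≠ []) →
      L.foldl (fun acc kv => PySem.Str.replace acc kv.1 kv.2) s
        = String.ofList ((L.map (fun kv => (kv.1.toList, kv.2.toList))).foldl
            (fun acc kv => pvRepl kv.1 kv.2 acc) s.toList) := by
  intro L
  induction L with
  | nil => intro s _; simp [String.ofList_toList]
  | cons kv L ih =>
    intro s hne
    rw [List.map_cons, List.foldl_cons, List.foldl_cons,
        ih (PySem.Str.replace s kv.1 kv.2) (fun kv' h' => hne kv' (by simp [h']))]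
    congr 2
    rw [PySem.Str.replace, String.toList_ofList,
        pvReplace_eq kv.1.toList kv.2.toList s.toList (hne kv (by simp))]

theorem pvReplS_keys_ne_nil : ∀ kv ∈ pvReplS, kv.1.toList ≠ [] := by decide

theorem pvReplBranch (s : String) (hG : pvGood s.toList) :
    pvReplS.foldl (fun acc kv => PySem.Str.replace acc kv.1 kv.2) s
      = String.ofList (pvBScan s.toList) := by
  rw [pvFoldBridge pvReplS s pvReplS_keys_ne_nil]
  rw [show pvReplS.map (fun kv => (kv.1.toList, kv.2.toList)) = pvPairs from rfl]
  rw [pvMainChars s.toList hG]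

-- ===== VERDICT (by name: the statement is the Claim_ definition above) =====
theorem basic_readability_improvements_py_spec : Claim_equal_basic_readability_improvements_py := by
  intro s hDom hPre
  unfold Spec_basic_readability_improvements_py
  unfold basic_readability_improvements_py basic_readability_improvements_py_alt
  have hGoodOf : (∀ b ∈ pvBad, PySem.Str.isIn b s = false) → pvGood s.toList := by
    intro h b hb
    exact (PySem.Chars.isIn_eq_false_iff _ _).mp (h b hb)
  by_cases hlong : (PySem.Str.split₀ s).length > 20
  · simp only [if_pos hlong]
    rw [pvConj_eq pvConjs s (by decide)]
    cases hB : pvBConj pvConjs s with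
    | some r => rfl
    | none =>
      have hnone := pvBConj_none pvConjs s hB
      have hGood : pvGood s.toList := by
        apply hGoodOf
        rcases hPre with ⟨-, c, hc, hin⟩ | h
        · rw [hnone c hc] at hin; cases hin
        · exact h
      exact pvReplBranch s hGood
  · simp only [if_neg hlong]
    have hGood : pvGood s.toList := by
      apply hGoodOf
      rcases hPre with ⟨h1, -⟩ | h
      · exact absurd h1 hlong
      · exact h
    exact pvReplBranch s hGood
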